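-- pv_equiv track=rewrite | github.com/gaurav-kaushik/Merge-Excel-Files-From-Common-Column | excelOrganizer.py | compareColumns
-- ===== SOURCE A (Python) =====
-- def compareColumns(colA,colB):
-- # Perform comparison and record indices from each column with matches
--     if len(colA) > len(colB):
--         col1 = colA
--         col2 = colB
--     else:
--         col2 = colA
--         col1 = colB
--
--     col1_flag = []
--     col2_flag = []
--     for i in range(len(col2)):
--         for j in range(len(col1)):
--             if col1[j] == col2[i]:
--                 col1_flag.append(j)
--                 col2_flag.append(i)
--     return col1_flag, col2_flag
-- ===== SOURCE B (Python) =====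
-- def compareColumns(colA, colB):
--     # Hash col1 values to index lists once, then one lookup per col2 element.
--     if len(colA) > len(colB):
--         col1, col2 = colA, colB
--     else:
--         col1, col2 = colB, colA
--     idx = {}
--     for j, v in enumerate(col1):
--         idx.setdefault(v, []).append(j)
--     col1_flag = []
--     col2_flag = []
--     for i, v in enumerate(col2):
--         ms = idx.get(v, [])
--         col1_flag.extend(ms)
--         col2_flag.extend([i] * len(ms))
--     return col1_flag, col2_flag
-- ===== Notes on version B (the rewrite author's own statement) =====
-- stated objective: faster
-- what changed: Replaced the O(n*m) nested scan by a hash map from col1 values to their index lists built once, with a single dictionary lookup per col2 element.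
import Mathlib
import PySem

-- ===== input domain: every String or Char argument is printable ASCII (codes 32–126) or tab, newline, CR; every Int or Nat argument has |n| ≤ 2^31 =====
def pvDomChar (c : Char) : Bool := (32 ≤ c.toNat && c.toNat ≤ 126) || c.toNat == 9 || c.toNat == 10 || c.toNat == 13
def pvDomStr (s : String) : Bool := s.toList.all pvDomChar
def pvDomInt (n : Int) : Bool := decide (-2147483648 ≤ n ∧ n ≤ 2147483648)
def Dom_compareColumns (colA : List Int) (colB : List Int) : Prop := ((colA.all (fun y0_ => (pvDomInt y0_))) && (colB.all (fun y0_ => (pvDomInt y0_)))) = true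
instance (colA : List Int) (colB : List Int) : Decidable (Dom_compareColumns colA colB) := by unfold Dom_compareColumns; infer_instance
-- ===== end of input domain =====

-- B replaces A's O(n*m) nested scan by a value→index-list map built once over col1,
-- then one lookup per col2 element (asymptotically faster; return value identical).

-- ===== PORT A =====
-- literal transliteration of A: swap so col1 is the longer column, then the
-- nested index loops appending matching (j, i) index pairs.
def compareColumns (colA : List Int) (colB : List Int) : List Int × List Int :=
  let col1 := if colA.length > colB.length then colA else colB
  let col2 := if colA.length > colB.length then colB else colA
  (PySem.List.pyRange 0 (col2.length : Int)).foldl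
    (fun acc i =>
      (PySem.List.pyRange 0 (col1.length : Int)).foldl
        (fun acc2 j =>
          if PySem.List.pyGetD col1 j 0 = PySem.List.pyGetD col2 i 0 then
            (acc2.1 ++ [j], acc2.2 ++ [i])
          else acc2)
        acc)
    ([], [])

-- ===== PORT B =====
-- B-side helper: the value → index-list dictionary built over col1 (Python's
-- `idx.setdefault(v, []).append(j)` loop).
def pvIndexMap (col1 : List Int) : PySem.Dict Int (List Int) :=
  (PySem.List.enumerate col1).foldl
    (fun d p => d.insert p.2 (d.getD p.2 [] ++ [p.1]))
    PySem.Dict.empty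

def compareColumns_alt (colA : List Int) (colB : List Int) : List Int × List Int :=
  let col1 := if colA.length > colB.length then colA else colB
  let col2 := if colA.length > colB.length then colB else colA
  let idx := pvIndexMap col1
  (PySem.List.enumerate col2).foldl
    (fun acc p =>
      let ms := idx.getD p.2 []
      (acc.1 ++ ms, acc.2 ++ List.replicate ms.length p.1))
    ([], [])

-- ===== PRECONDITION & SPEC =====
def Spec_compareColumns (colA : List Int) (colB : List Int) (out : List Int × List Int) : Prop := out = compareColumns_alt colA colB
instance (colA : List Int) (colB : List Int) (out : List Int × List Int) : Decidable (Spec_compareColumns colA colB out) := by unfold Spec_compareColumns; infer_instance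

-- ===== CLAIM (what is proved, stated in full; the proofs are below) =====
def Claim_equal_compareColumns : Prop := ∀ (colA : List Int) (colB : List Int), Dom_compareColumns colA colB → Spec_compareColumns colA colB (compareColumns colA colB)

-- ===== LEMMAS AND PROOFS =====

-- the index list of value v among (enumerate xs s)
def pvMatches (xs : List Int) (s : Int) (v : Int) : List Int :=
  (PySem.List.enumerate xs s).filterMap (fun p => if p.2 = v then some p.1 else none)

theorem pvMatches_nil (s v : Int) : pvMatches [] s v = [] := rfl

theorem pvMatches_cons (x : Int) (xs : List Int) (s v : Int) :
    pvMatches (x :: xs) s v =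
      (if x = v then [s] else []) ++ pvMatches xs (s + 1) v := by
  simp only [pvMatches, PySem.List.enumerate_cons, List.filterMap_cons]
  split_ifs <;> simp

-- the dictionary built by pvIndexMap's loop, starting from d
theorem pvIndexMap_getD :
    ∀ (xs : List Int) (s : Int) (d : PySem.Dict Int (List Int)) (v : Int),
      (((PySem.List.enumerate xs s).foldl
          (fun d p => d.insert p.2 (d.getD p.2 [] ++ [p.1])) d).getD v [])
        = d.getD v [] ++ pvMatches xs s v := by
  intro xs
  induction xs with
  | nil => intro s d v; simp [PySem.List.enumerate, pvMatches_nil]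
  | cons x xs ih =>
      intro s d v
      rw [PySem.List.enumerate_cons]
      simp only [List.foldl_cons]
      rw [ih, pvMatches_cons, PySem.Dict.getD_insert]
      by_cases h : v = x
      · subst h; simp
      · have h' : x ≠ v := fun he => h he.symm
        simp [h, h']

-- A's inner scan over enumerate col1 collects exactly pvMatches col1 0 v
theorem pvInnerScan (i v : Int) :
    ∀ (xs : List Int) (s : Int) (acc : List Int × List Int),
      (PySem.List.enumerate xs s).foldl
          (fun acc2 p => if p.2 = v then (acc2.1 ++ [p.1], acc2.2 ++ [i]) else acc2) acc
        = (acc.1 ++ pvMatches xs s v,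
           acc.2 ++ List.replicate (pvMatches xs s v).length i) := by
  intro xs
  induction xs with
  | nil => intro s acc; simp [PySem.List.enumerate, pvMatches_nil]
  | cons x xs ih =>
      intro s acc
      rw [PySem.List.enumerate_cons]
      simp only [List.foldl_cons]
      rw [pvMatches_cons]
      by_cases h : x = v
      · simp only [h, ih]
        simp [List.replicate_succ]
      · simp only [ih, h]
        simp

theorem pvEnum_nil {α : Type} (s : Int) : PySem.List.enumerate ([] : List α) s = [] := rfl

-- range/pyGetD index loop = loop over enumerate
theorem pvEnum_snoc {α : Type} : ∀ (xs : List α) (a : α) (s : Int),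
    PySem.List.enumerate (xs ++ [a]) s
      = PySem.List.enumerate xs s ++ [(s + xs.length, a)] := by
  intro xs
  induction xs with
  | nil =>
      intro a s
      rw [List.nil_append, PySem.List.enumerate_cons, pvEnum_nil]
      simp
  | cons x xs ih =>
      intro a s
      simp only [List.cons_append, PySem.List.enumerate_cons, ih]
      simp
      ring_nf

theorem pvRange_map_enum : ∀ (xs : List Int),
    (PySem.List.pyRange 0 (xs.length : Int)).map
        (fun j => ((j : Int), PySem.List.pyGetD xs j 0))
      = PySem.List.enumerate xs := by
  intro xs
  induction xs using List.reverseRecOn with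
  | nil => simp [PySem.List.pyRange_one_eq_nil, PySem.List.enumerate]
  | append_singleton ys a ih =>
      have hlen : ((ys ++ [a]).length : Int) = (ys.length : Int) + 1 := by
        simp
      rw [hlen, PySem.List.pyRange_one_succ_right (by positivity), List.map_append,
          pvEnum_snoc]
      congr 1
      · rw [← ih]
        apply List.map_congr_left
        intro j hj
        have hb := (PySem.List.mem_pyRange_one.mp hj)
        have h0 : (0:Int) ≤ j := hb.1
        have h1 : j < (ys.length : Int) := hb.2
        have h1' : j < ((ys ++ [a]).length : Int) := by rw [hlen]; omega
        rw [PySem.List.pyGetD_eq_getElem _ _ h0 h1', PySem.List.pyGetD_eq_getElem _ _ h0 h1]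
        congr 1
        exact List.getElem_append_left (by omega)
      · have h0 : (0:Int) ≤ (ys.length : Int) := by positivity
        have h1 : (ys.length : Int) < ((ys ++ [a]).length : Int) := by simp
        simp only [List.map_cons, List.map_nil]
        rw [PySem.List.pyGetD_eq_getElem _ _ h0 h1]
        simp

-- A's inner scan, stated over the range/pyGetD form it actually has in port A
theorem pvInnerRange (i v : Int) (xs : List Int) (acc : List Int × List Int) :
    (PySem.List.pyRange 0 (xs.length : Int)).foldl
        (fun acc2 j => if PySem.List.pyGetD xs j 0 = v then (acc2.1 ++ [j], acc2.2 ++ [i]) else acc2) acc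
      = (acc.1 ++ pvMatches xs 0 v,
         acc.2 ++ List.replicate (pvMatches xs 0 v).length i) := by
  have h := pvInnerScan i v xs 0 acc
  rw [← pvRange_map_enum xs, List.foldl_map] at h
  simpa using h

-- ===== VERDICT (by name: the statement is the Claim_ definition above) =====
theorem compareColumns_spec : Claim_equal_compareColumns := by
  intro colA colB _
  unfold Spec_compareColumns compareColumns compareColumns_alt
  dsimp only
  set col1 := if colA.length > colB.length then colA else colB with hc1
  set col2 := if colA.length > colB.length then colB else colA with hc2
  rw [← pvRange_map_enum col2, List.foldl_map]
  apply PySem.List.foldl_congr_mem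
  intro acc i _
  dsimp only
  rw [pvInnerRange i (PySem.List.pyGetD col2 i 0) col1 acc, pvIndexMap, pvIndexMap_getD]
  simp [PySem.Dict.getD, PySem.Dict.get?, PySem.Dict.empty]
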